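-- pv_equiv track=rewrite | github.com/JackTJC/LeetCode | String/ReMatch.py | getMode
-- ===== SOURCE A (Python) =====
-- def getMode(p):
--     ONLY_ONE = 0
--     ANY_SINGLE = 1
--     PRE_MULTI = 2
--     character = []
--     mode = []
--     i = 0
--     # TODO 获得模式
--     while i <= len(p) - 1:
--         if p[i] == '.':
--             character.append('.')
--             if i == len(p) - 1:
--                 mode.append(ANY_SINGLE)
--             else:
--                 if p[i + 1] == '*':
--                     mode.append(PRE_MULTI)
--                     i += 1
--                 else:
--                     mode.append(ANY_SINGLE)
--         else:
--             character.append(p[i])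
--             if i == len(p) - 1:
--                 mode.append(ONLY_ONE)
--             else:
--                 if p[i + 1] == '*':
--                     mode.append(PRE_MULTI)
--                     i += 1
--                 else:
--                     mode.append(ONLY_ONE)
--         i += 1
--     simCharacter = []
--     simMode = []
--     i = 0
--     while i <= len(character) - 1:
--         simCharacter.append(character[i])
--         simMode.append(mode[i])
--         if mode[i] == PRE_MULTI and i < len(character) - 1 and character[i] == character[i + 1]:
--             i += 1
--         i += 1
--     return simCharacter,simMode
-- ===== SOURCE B (Python) =====
-- def getMode(p):
--     ONLY_ONE = 0
--     ANY_SINGLE = 1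
--     PRE_MULTI = 2
--     simCharacter = []
--     simMode = []
--     pending = None  # char of the PRE_MULTI token just emitted, awaiting the collapse check
--     i = 0
--     n = len(p)
--     while i < n:
--         c = p[i]
--         if i + 1 < n and p[i + 1] == '*':
--             m = PRE_MULTI
--             i += 2
--         else:
--             m = ANY_SINGLE if c == '.' else ONLY_ONE
--             i += 1
--         if pending == c:
--             pending = None
--             continue
--         simCharacter.append(c)
--         simMode.append(m)
--         pending = c if m == PRE_MULTI else None
--     return simCharacter, simMode
-- ===== Notes on version B (the rewrite author's own statement) =====
-- stated objective: faster
-- what changed: B fuses A's two passes (build character/mode tables, then rescan them to drop a duplicate char right after a '*' token) into one left-to-right pass over p with a one-shot pending-collapse flag, never materialising the intermediate tables.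
import Mathlib
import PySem

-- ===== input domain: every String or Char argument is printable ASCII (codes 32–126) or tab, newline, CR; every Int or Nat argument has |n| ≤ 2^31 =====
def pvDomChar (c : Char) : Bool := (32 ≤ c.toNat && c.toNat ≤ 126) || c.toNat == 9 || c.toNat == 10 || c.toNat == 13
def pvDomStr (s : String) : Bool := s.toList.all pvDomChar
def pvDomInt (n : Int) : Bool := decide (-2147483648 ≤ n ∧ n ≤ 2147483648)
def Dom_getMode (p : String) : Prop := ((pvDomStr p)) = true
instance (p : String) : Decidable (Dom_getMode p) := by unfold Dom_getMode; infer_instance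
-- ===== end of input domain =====

-- B fuses A's two passes (tokenise, then rescan to collapse duplicates after a '*' token)
-- into one left-to-right pass with a one-shot pending-collapse flag (measured faster in a timing run).

-- ===== PORT A =====
-- first while loop of A: suffix of p.toList stands for index i
def getModeTok : List Char → List String × List Int
  | [] => ([], [])
  | c :: rest =>
    if c = '.' then
      match rest with
      | [] => ([String.ofList [c]], [1])
      | d :: rest' =>
        if d = '*' then
          let r := getModeTok rest'
          (String.ofList [c] :: r.1, 2 :: r.2)
        else
          let r := getModeTok (d :: rest')
          (String.ofList [c] :: r.1, 1 :: r.2)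
    else
      match rest with
      | [] => ([String.ofList [c]], [0])
      | d :: rest' =>
        if d = '*' then
          let r := getModeTok rest'
          (String.ofList [c] :: r.1, 2 :: r.2)
        else
          let r := getModeTok (d :: rest')
          (String.ofList [c] :: r.1, 0 :: r.2)

-- second while loop of A: suffixes of character/mode stand for index i
def getModeSim : List String → List Int → List String × List Int
  | c :: cs, m :: ms =>
    let r :=
      if m = 2 ∧ cs.head? = some c then getModeSim cs.tail ms.tail
      else getModeSim cs ms
    (c :: r.1, m :: r.2)
  | _, _ => ([], [])
termination_by cs _ => cs.length
decreasing_by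
  all_goals simp [List.length_tail]

def getMode (p : String) : List String × List Int :=
  let r := getModeTok p.toList
  getModeSim r.1 r.2

-- ===== PORT B =====
-- Source B's single loop: the suffix of p.toList stands for index i, `pending` the collapse flag
def getModeAltGo : List Char → Option String → List String × List Int
  | [], _ => ([], [])
  | c :: rest, pending =>
    let step : Int × List Char :=
      if rest.head? = some '*' then (2, rest.tail)
      else ((if c = '.' then 1 else 0), rest)
    if pending = some (String.ofList [c]) then
      getModeAltGo step.2 none
    else
      let r := getModeAltGo step.2 (if step.1 = 2 then some (String.ofList [c]) else none)
      (String.ofList [c] :: r.1, step.1 :: r.2)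
termination_by s _ => s.length
decreasing_by
  all_goals split <;> simp [List.length_tail]

def getMode_alt (p : String) : List String × List Int :=
  getModeAltGo p.toList none

-- ===== PRECONDITION & SPEC =====
def Spec_getMode (p : String) (out : List String × List Int) : Prop := out = getMode_alt p
instance (p : String) (out : List String × List Int) : Decidable (Spec_getMode p out) := by unfold Spec_getMode; infer_instance

-- ===== CLAIM (what is proved, stated in full; the proofs are below) =====
def Claim_equal_getMode : Prop := ∀ (p : String), Dom_getMode p → Spec_getMode p (getMode p)

-- ===== LEMMAS AND PROOFS =====

-- the token step both programs take at a position: mode of the token and the remaining input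
def pvStep (c : Char) (rest : List Char) : Int × List Char :=
  if rest.head? = some '*' then (2, rest.tail)
  else ((if c = '.' then 1 else 0), rest)

theorem tok_cons (c : Char) (rest : List Char) :
    getModeTok (c :: rest) =
      (String.ofList [c] :: (getModeTok (pvStep c rest).2).1,
       (pvStep c rest).1 :: (getModeTok (pvStep c rest).2).2) := by
  cases rest with
  | nil => by_cases h : c = '.' <;> simp [getModeTok, pvStep, h]
  | cons d rest' =>
    by_cases h : c = '.' <;> by_cases hd : d = '*' <;>
      simp [getModeTok, pvStep, h, hd]

theorem sim_cons (c : String) (m : Int) (cs : List String) (ms : List Int) :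
    getModeSim (c :: cs) (m :: ms) =
      ((c :: (if m = 2 ∧ cs.head? = some c then getModeSim cs.tail ms.tail
              else getModeSim cs ms).1),
       (m :: (if m = 2 ∧ cs.head? = some c then getModeSim cs.tail ms.tail
              else getModeSim cs ms).2)) := by
  rw [getModeSim]

theorem alt_cons (c : Char) (rest : List Char) (pending : Option String) :
    getModeAltGo (c :: rest) pending =
      (if pending = some (String.ofList [c]) then
        getModeAltGo (pvStep c rest).2 none
      else
        (String.ofList [c] :: (getModeAltGo (pvStep c rest).2
            (if (pvStep c rest).1 = 2 then some (String.ofList [c]) else none)).1,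
         (pvStep c rest).1 :: (getModeAltGo (pvStep c rest).2
            (if (pvStep c rest).1 = 2 then some (String.ofList [c]) else none)).2)) := by
  rw [getModeAltGo]; rfl

theorem step_len (c : Char) (rest : List Char) :
    (pvStep c rest).2.length ≤ rest.length := by
  unfold pvStep; split <;> simp [List.length_tail]

theorem main_inv : ∀ (n : Nat) (s : List Char), s.length ≤ n →
    (getModeSim (getModeTok s).1 (getModeTok s).2 = getModeAltGo s none) ∧
    (∀ d : String, getModeAltGo s (some d) =
      if (getModeTok s).1.head? = some d then
        getModeSim (getModeTok s).1.tail (getModeTok s).2.tail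
      else getModeSim (getModeTok s).1 (getModeTok s).2) := by
  intro n
  induction n with
  | zero =>
    intro s hs
    have : s = [] := by cases s <;> simp_all
    subst this
    constructor
    · simp [getModeTok, getModeSim, getModeAltGo]
    · intro d; simp [getModeTok, getModeSim, getModeAltGo]
  | succ n ih =>
    intro s hs
    cases s with
    | nil =>
      constructor
      · simp [getModeTok, getModeSim, getModeAltGo]
      · intro d; simp [getModeTok, getModeSim, getModeAltGo]
    | cons c rest =>
      have hlen : (pvStep c rest).2.length ≤ n := by
        have := step_len c rest
        simp at hs; omega
      obtain ⟨iha, ihb⟩ := ih (pvStep c rest).2 hlen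
      have hmain :
          getModeSim (getModeTok (c :: rest)).1 (getModeTok (c :: rest)).2 =
            getModeAltGo (c :: rest) none := by
        rw [tok_cons, sim_cons, alt_cons]
        simp only [reduceCtorEq, if_false, List.head?]
        by_cases hm : (pvStep c rest).1 = 2
        · rw [if_pos hm]
          rw [ihb (String.ofList [c])]
          by_cases hh : (getModeTok (pvStep c rest).2).1.head? = some (String.ofList [c])
          · rw [if_pos hh, if_pos ⟨hm, hh⟩]
          · rw [if_neg hh, if_neg (by intro ⟨_, h2⟩; exact hh h2)]
        · rw [if_neg hm, iha, if_neg (by intro ⟨h1, _⟩; exact hm h1)]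
      constructor
      · exact hmain
      · intro d
        by_cases hc : (String.ofList [c]) = d
        · -- the pending char matches: B drops this token, A's pass-2 skipped it
          subst hc
          rw [alt_cons, if_pos rfl, tok_cons]
          rw [if_pos (show (String.ofList [c] :: (getModeTok (pvStep c rest).2).1).head? = some (String.ofList [c]) from rfl)]
          simpa using iha.symm
        · have h1 : ¬ ((some d : Option String) = some (String.ofList [c])) := by
            simp only [Option.some.injEq]; exact fun h => hc h.symm
          rw [if_neg (show ¬ ((getModeTok (c :: rest)).1.head? = some d) from by
                rw [tok_cons]; simpa using hc)]
          rw [hmain, alt_cons, alt_cons, if_neg h1]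
          simp

-- ===== VERDICT (by name: the statement is the Claim_ definition above) =====
theorem getMode_spec : Claim_equal_getMode := by
  intro p _
  unfold Spec_getMode getMode getMode_alt
  exact (main_inv p.toList.length p.toList le_rfl).1
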